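-- pv_equiv track=rewrite | github.com/scikal/LD-CHASE | MAKE_STATISTICAL_MODEL.py | ENGINE
-- ===== SOURCE A (Python) =====
-- from itertools import product
-- from collections import defaultdict
--
-- def ENGINE(number_of_reads,degeneracies):
--     """ Generates polysomy statistical models for n-reads, based of a list of
--     the degeneracy of each homolog. """
--
--     degeneracies_dict = {i:w for i,w in enumerate(degeneracies) if w>0}
--     model = defaultdict(int)
--     for sequence in product(degeneracies_dict, repeat=number_of_reads):
--         haplotypes = defaultdict(list)
--         weight = 1
--         for read_ind,hap in enumerate(sequence):
--             haplotypes[hap].append(read_ind)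
--             weight *=  degeneracies_dict[hap]
--         key = tuple(tuple(indices) for indices in haplotypes.values())
--         model[key] += weight
--     return model
-- ===== SOURCE B (Python) =====
-- from collections import defaultdict
--
-- def ENGINE(number_of_reads, degeneracies):
--     """ Generates polysomy statistical models for n-reads, based of a list of
--     the degeneracy of each homolog. """
--
--     positives = [(i, w) for i, w in enumerate(degeneracies) if w > 0]
--     D = len(positives)
--
--     def rgs(m, used):
--         # restricted-growth strings of length m, lexicographic order,
--         # continuing a prefix that already used `used` block labels
--         if m == 0:
--             return [[]]
--         out = []
--         for j in range(min(used + 1, D)):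
--             for rest in rgs(m - 1, max(used, j + 1)):
--                 out.append([j] + rest)
--         return out
--
--     def blocks_of(r):
--         k = 0
--         for j in r:
--             k = max(k, j + 1)
--         return tuple(tuple(i for i, v in enumerate(r) if v == j) for j in range(k))
--
--     def weight(r, assigned):
--         # sum over injective assignments of distinct homologs to the blocks
--         if not r:
--             return 1
--         j, rest = r[0], r[1:]
--         if j < len(assigned):
--             return assigned[j][1] * weight(rest, assigned)
--         t = 0
--         for p in positives:
--             if all(a[0] != p[0] for a in assigned):
--                 t += p[1] * weight(rest, assigned + [p])
--         return t
--
--     model = defaultdict(int)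
--     for r in rgs(number_of_reads, 0):
--         model[blocks_of(r)] = weight(r, [])
--     return model
-- ===== Notes on version B (the rewrite author's own statement) =====
-- stated objective: alternative
-- what changed: Instead of enumerating all D^n homolog sequences and grouping them in a dict keyed by the induced read partition, B enumerates the set partitions themselves (restricted-growth strings in lexicographic order, which reproduces the dict's first-occurrence order) and computes each partition's coefficient as a sum over injective assignments of distinct homologs to its blocks; no grouping dict is needed.
import Mathlib
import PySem

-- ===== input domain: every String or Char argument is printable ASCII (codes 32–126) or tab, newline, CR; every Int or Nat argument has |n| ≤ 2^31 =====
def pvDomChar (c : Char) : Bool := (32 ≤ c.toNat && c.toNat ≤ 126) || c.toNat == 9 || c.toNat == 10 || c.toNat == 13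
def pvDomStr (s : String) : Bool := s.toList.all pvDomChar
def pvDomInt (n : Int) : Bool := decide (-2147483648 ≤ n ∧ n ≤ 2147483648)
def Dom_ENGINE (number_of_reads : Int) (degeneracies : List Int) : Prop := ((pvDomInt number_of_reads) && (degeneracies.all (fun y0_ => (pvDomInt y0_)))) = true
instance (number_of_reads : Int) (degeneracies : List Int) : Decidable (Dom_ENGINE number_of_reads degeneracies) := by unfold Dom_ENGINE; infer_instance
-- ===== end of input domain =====

-- B enumerates the read partitions directly (restricted-growth strings in lexicographic
-- order, = the dict's first-occurrence order) and sums injective homolog assignments per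
-- partition, instead of A's grouping of all D^n sequences in a dict (objective: alternative).

-- ===== PORT A =====
-- itertools.product(keys, repeat=m), leftmost factor varying slowest
def pvProd (keys : List Int) : Nat → List (List Int)
  | 0 => [[]]
  | m + 1 => keys.flatMap (fun k => (pvProd keys m).map (k :: ·))

def ENGINE (number_of_reads : Int) (degeneracies : List Int) : List (List (List Int) × Int) :=
  let dd : PySem.Dict Int Int :=
    PySem.Dict.ofList ((PySem.List.enumerate degeneracies).filter (fun p => decide (0 < p.2)))
  let model : PySem.Dict (List (List Int)) Int :=
    (pvProd dd.keys number_of_reads.toNat).foldl (fun model sequence =>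
      let hw : PySem.Dict Int (List Int) × Int :=
        (PySem.List.enumerate sequence).foldl
          (fun (acc : PySem.Dict Int (List Int) × Int) p =>
            (acc.1.modify p.2 [] (· ++ [p.1]), acc.2 * dd.getD p.2 0))
          (PySem.Dict.empty, 1)
      model.modify hw.1.values 0 (· + hw.2)) PySem.Dict.empty
  model.items

-- ===== PORT B =====
def pvPos (degeneracies : List Int) : List (Int × Int) :=
  (PySem.List.enumerate degeneracies).filter (fun p => decide (0 < p.2))

-- restricted-growth strings of length m continuing a prefix that used `used` labels
def pvRgs (D : Nat) : Nat → Nat → List (List Nat)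
  | 0, _ => [[]]
  | m + 1, used =>
      (List.range (min (used + 1) D)).flatMap
        (fun j => (pvRgs D m (max used (j + 1))).map (j :: ·))

def pvBlocks (r : List Nat) : List (List Int) :=
  let k := r.foldl (fun a j => max a (j + 1)) 0
  (List.range k).map (fun j => ((PySem.List.enumerate r).filter (fun p => p.2 == j)).map (·.1))

def pvWeight (pos : List (Int × Int)) : List Nat → List (Int × Int) → Int
  | [], _ => 1
  | j :: rest, assigned =>
      if h : j < assigned.length then
        assigned[j].2 * pvWeight pos rest assigned
      else
        (pos.filter (fun p => assigned.all (fun a => decide (a.1 ≠ p.1)))).foldl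
          (fun t p => t + p.2 * pvWeight pos rest (assigned ++ [p])) 0

def ENGINE_alt (number_of_reads : Int) (degeneracies : List Int) : List (List (List Int) × Int) :=
  let pos := pvPos degeneracies
  (pvRgs pos.length number_of_reads.toNat 0).map (fun r => (pvBlocks r, pvWeight pos r []))

-- ===== PRECONDITION & SPEC =====
-- A raises ValueError on negative number_of_reads (product's repeat must be ≥ 0)
def Pre_ENGINE (number_of_reads : Int) (degeneracies : List Int) : Prop :=
  0 ≤ number_of_reads
instance (number_of_reads : Int) (degeneracies : List Int) : Decidable (Pre_ENGINE number_of_reads degeneracies) := by unfold Pre_ENGINE; infer_instance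

def pvWitness_ENGINE : Int × List Int := (2, [2, 3])

def Spec_ENGINE (number_of_reads : Int) (degeneracies : List Int) (out : List (List (List Int) × Int)) : Prop := out = ENGINE_alt number_of_reads degeneracies
instance (number_of_reads : Int) (degeneracies : List Int) (out : List (List (List Int) × Int)) : Decidable (Spec_ENGINE number_of_reads degeneracies out) := by unfold Spec_ENGINE; infer_instance

-- ===== CLAIM (what is proved, stated in full; the proofs are below) =====
def Claim_equal_ENGINE : Prop := ∀ (number_of_reads : Int) (degeneracies : List Int), Dom_ENGINE number_of_reads degeneracies → Pre_ENGINE number_of_reads degeneracies → Spec_ENGINE number_of_reads degeneracies (ENGINE number_of_reads degeneracies)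

-- ===== LEMMAS AND PROOFS =====


-- first-occurrence dedup with a seen-accumulator
def pvFD {α : Type} [BEq α] [LawfulBEq α] : List α → List α → List α
  | _, [] => []
  | seen, x :: l => if x ∈ seen then pvFD seen l else x :: pvFD (seen ++ [x]) l

theorem pvFD_congr {α : Type} [BEq α] [LawfulBEq α] (l : List α) :
    ∀ (s s' : List α), (∀ a, a ∈ s ↔ a ∈ s') → pvFD s l = pvFD s' l := by
  induction l with
  | nil => intro s s' _; rfl
  | cons x l ih =>
    intro s s' h
    simp only [pvFD]
    by_cases hx : x ∈ s
    · rw [if_pos hx, if_pos ((h x).1 hx)]; exact ih s s' h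
    · rw [if_neg hx, if_neg (fun hc => hx ((h x).2 hc))]
      congr 1
      exact ih _ _ (by intro a; simp [h a])

theorem pvFD_append {α : Type} [BEq α] [LawfulBEq α] (A : List α) :
    ∀ (s B : List α), pvFD s (A ++ B) = pvFD s A ++ pvFD (s ++ A) B := by
  induction A with
  | nil => intro s B; simp [pvFD]
  | cons x A ih =>
    intro s B
    simp only [List.cons_append, pvFD]
    by_cases hx : x ∈ s
    · rw [if_pos hx, if_pos hx, ih]
      congr 1
      refine pvFD_congr _ _ _ (fun a => ?_)
      simp only [List.mem_append, List.mem_cons]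
      constructor
      · rintro (h | h) <;> tauto
      · rintro (h | h | h)
        · tauto
        · exact Or.inl (h ▸ hx)
        · tauto
    · rw [if_neg hx, if_neg hx, ih]
      simp only [List.cons_append]
      congr 2
      refine pvFD_congr _ _ _ (fun a => ?_)
      simp only [List.mem_append, List.mem_cons, List.mem_singleton]
      tauto

theorem pvFD_nil_of_subset {α : Type} [BEq α] [LawfulBEq α] (l : List α) :
    ∀ (s : List α), (∀ a ∈ l, a ∈ s) → pvFD s l = [] := by
  induction l with
  | nil => intro s _; rfl
  | cons x l ih =>
    intro s h
    simp only [pvFD, if_pos (h x (by simp))]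
    exact ih s (fun a ha => h a (by simp [ha]))

theorem pvFD_sub {α : Type} [BEq α] [LawfulBEq α] (l : List α) :
    ∀ (s : List α), ∀ a ∈ pvFD s l, a ∈ l := by
  induction l with
  | nil => intro s a ha; simp [pvFD] at ha
  | cons x l ih =>
    intro s a ha
    simp only [pvFD] at ha
    by_cases hx : x ∈ s
    · rw [if_pos hx] at ha; exact List.mem_cons_of_mem _ (ih s a ha)
    · rw [if_neg hx] at ha
      rcases List.mem_cons.1 ha with h | h
      · simp [h]
      · exact List.mem_cons_of_mem _ (ih _ a h)

theorem pvFD_complete {α : Type} [BEq α] [LawfulBEq α] (l : List α) :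
    ∀ (s : List α) (a : α), a ∈ l → a ∉ s → a ∈ pvFD s l := by
  induction l with
  | nil => intro s a ha _; simp at ha
  | cons x l ih =>
    intro s a ha hs
    simp only [pvFD]
    by_cases hx : x ∈ s
    · rw [if_pos hx]
      rcases List.mem_cons.1 ha with h | h
      · exact absurd (h ▸ hx) hs
      · exact ih s a h hs
    · rw [if_neg hx]
      rcases List.mem_cons.1 ha with h | h
      · simp [h]
      · by_cases hax : a = x
        · simp [hax]
        · exact List.mem_cons_of_mem _ (ih _ a h (by simp [hs, hax]))

theorem set_update_eq_pvFD {α : Type} [BEq α] [LawfulBEq α] (l : List α) :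
    ∀ (s : List α), PySem.Set.update s l = s ++ pvFD s l := by
  induction l with
  | nil => intro s; simp [PySem.Set.update_nil, pvFD]
  | cons x l ih =>
    intro s
    rw [PySem.Set.update_cons]
    by_cases hx : x ∈ s
    · have : PySem.Set.add s x = s := by
        simp [PySem.Set.add, PySem.Set.contains_eq_listContains, List.contains_iff_mem, hx]
      rw [this, ih, pvFD, if_pos hx]
    · have : PySem.Set.add s x = s ++ [x] := by
        simp [PySem.Set.add, PySem.Set.contains_eq_listContains, List.contains_iff_mem, hx]
      rw [this, ih, pvFD, if_neg hx, List.append_assoc]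
      rfl

theorem set_ofList_eq_pvFD {α : Type} [BEq α] [LawfulBEq α] (l : List α) :
    PySem.Set.ofList l = pvFD [] l := by
  rw [← PySem.Set.update_nil_left, set_update_eq_pvFD]; rfl

theorem pvFD_map_hd (j : Nat) (S : List (List Nat)) :
    ∀ (seen T : List (List Nat)), (∀ t, (j :: t) ∈ seen ↔ t ∈ T) →
      pvFD seen (S.map (j :: ·)) = (pvFD T S).map (j :: ·) := by
  induction S with
  | nil => intro seen T _; rfl
  | cons s S ih =>
    intro seen T h
    simp only [List.map_cons, pvFD]
    by_cases hs : s ∈ T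
    · rw [if_pos ((h s).2 hs), if_pos hs]; exact ih seen T h
    · rw [if_neg (fun hc => hs ((h s).1 hc)), if_neg hs, List.map_cons]
      congr 1
      refine ih _ _ (fun t => ?_)
      simp only [List.mem_append, List.mem_singleton, h t, List.cons_eq_cons]
      constructor
      · rintro (ht | ⟨_, ht⟩) <;> simp [ht]
      · rintro (ht | ht) <;> simp [ht]

theorem pvFD_map_of_inj {α β : Type} [BEq α] [LawfulBEq α] [BEq β] [LawfulBEq β] (f : α → β) (L : List α) :
    ∀ (T : List α), (∀ a b, a ∈ L → (b ∈ T ∨ b ∈ L) → f a = f b → a = b) →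
      pvFD (T.map f) (L.map f) = (pvFD T L).map f := by
  induction L with
  | nil => intro T _; rfl
  | cons x L ih =>
    intro T hinj
    simp only [List.map_cons, pvFD]
    have hmem : f x ∈ T.map f ↔ x ∈ T := by
      constructor
      · intro h
        rcases List.mem_map.1 h with ⟨b, hb, hfb⟩
        exact (hinj x b (by simp) (Or.inl hb) hfb.symm) ▸ hb
      · intro h; exact List.mem_map_of_mem h
    by_cases hx : x ∈ T
    · rw [if_pos (hmem.2 hx), if_pos hx]
      exact ih T (fun a b ha hb => hinj a b (by simp [ha]) (by tauto) )
    · rw [if_neg (fun hc => hx (hmem.1 hc)), if_neg hx, List.map_cons]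
      congr 1
      have hx1 : List.map f T ++ [f x] = List.map f (T ++ [x]) := by simp
      rw [hx1]
      exact ih (T ++ [x]) (fun a b ha hb => hinj a b (by simp [ha])
        (by rcases hb with hb | hb
            · rcases List.mem_append.1 hb with h | h
              · exact Or.inl h
              · simp at h; simp [h]
            · simp [hb]))

-- d.items from keys and getD, for a dict with distinct keys
theorem dict_items_eq {κ ν : Type} [BEq κ] [LawfulBEq κ] (items : List (κ × ν)) (dflt : ν) :
    (List.map (fun x => x.1) items).Nodup →
      items = (List.map (fun x => x.1) items).map
        (fun k => (k, (PySem.Dict.mk items).getD k dflt)) := by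
  induction items with
  | nil => intro _; rfl
  | cons p rest ih =>
    intro h
    simp only [List.map_cons, List.nodup_cons] at h ⊢
    obtain ⟨hp, hrest⟩ := h
    have hhead : (PySem.Dict.mk (p :: rest)).getD p.1 dflt = p.2 := by
      apply PySem.Dict.getD_of_mem_items (d := PySem.Dict.mk (p :: rest)) (by simp)
      simp only [PySem.Dict.keys]
      simp [List.nodup_cons, hp, hrest]
    rw [List.cons_eq_cons]
    constructor
    · simp [hhead]
    · have hstep : ∀ k ∈ List.map (fun x => x.1) rest,
          (PySem.Dict.mk (p :: rest)).getD k dflt = (PySem.Dict.mk rest).getD k dflt := by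
        intro k hk
        have hne : ¬ (p.1 == k) = true := by
          intro hc
          exact hp (((beq_iff_eq).1 hc) ▸ hk)
        rw [PySem.Dict.getD_eq_get?_getD, PySem.Dict.getD_eq_get?_getD, PySem.Dict.get?_mk_cons,
          if_neg hne]
      calc rest = (List.map (fun x => x.1) rest).map
            (fun k => (k, (PySem.Dict.mk rest).getD k dflt)) := ih hrest
        _ = (List.map (fun x => x.1) rest).map
            (fun k => (k, (PySem.Dict.mk (p :: rest)).getD k dflt)) :=
          List.map_congr_left (fun k hk => by rw [hstep k hk])
theorem foldl_pair {α β γ : Type} (l : List γ) (f : α → γ → α) (g : β → γ → β) :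
    ∀ (a : α) (b : β),
      l.foldl (fun acc p => (f acc.1 p, g acc.2 p)) (a, b) = (l.foldl f a, l.foldl g b) := by
  induction l with
  | nil => intro a b; rfl
  | cons x l ih => intro a b; simpa using ih (f a x) (g b x)

theorem foldl_mul {α : Type} (l : List α) (h : α → Int) :
    ∀ (b : Int), l.foldl (fun b x => b * h x) b = b * (l.map h).prod := by
  induction l with
  | nil => intro b; simp
  | cons x l ih => intro b; simp [ih (b * h x), mul_assoc]

theorem foldl_add_int {α : Type} (l : List α) (g : α → Int) :
    ∀ (t : Int), l.foldl (fun t x => t + g x) t = t + (l.map g).sum := by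
  induction l with
  | nil => intro t; simp
  | cons x l ih => intro t; simp [ih (t + g x), add_assoc]

theorem getD_foldl_modify_add {κ α : Type} [BEq κ] [LawfulBEq κ] [DecidableEq κ]
    (l : List α) (key : α → κ) (w : α → Int) :
    ∀ (d : PySem.Dict κ Int) (k : κ),
      (l.foldl (fun d x => d.modify (key x) 0 (fun v => v + w x)) d).getD k 0
        = d.getD k 0 + ((l.filter (fun x => key x == k)).map w).sum := by
  induction l with
  | nil => intro d k; simp
  | cons x l ih =>
    intro d k
    simp only [List.foldl_cons, List.filter_cons]
    rw [ih]
    by_cases hk : key x = k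
    · rw [if_pos (by simp [hk]), PySem.Dict.getD_modify, if_pos hk.symm, hk]
      simp [add_assoc, add_comm, add_left_comm]
    · rw [if_neg (by simp [hk]), PySem.Dict.getD_modify, if_neg (fun hc => hk hc.symm)]

theorem getD_foldl_modify_app {κ α β : Type} [BEq κ] [LawfulBEq κ] [DecidableEq κ]
    (l : List α) (key : α → κ) (v : α → β) :
    ∀ (d : PySem.Dict κ (List β)) (k : κ),
      (l.foldl (fun d x => d.modify (key x) [] (fun L => L ++ [v x])) d).getD k []
        = d.getD k [] ++ (l.filter (fun x => key x == k)).map v := by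
  induction l with
  | nil => intro d k; simp
  | cons x l ih =>
    intro d k
    simp only [List.foldl_cons, List.filter_cons]
    rw [ih]
    by_cases hk : key x = k
    · rw [if_pos (by simp [hk]), PySem.Dict.getD_modify, if_pos hk.symm, hk]
      simp
    · rw [if_neg (by simp [hk]), PySem.Dict.getD_modify, if_neg (fun hc => hk hc.symm)]

theorem keys_foldl_modify_empty {κ α : Type} [BEq κ] [LawfulBEq κ] [DecidableEq κ]
    (l : List α) (key : α → κ) (d0 : ν) (f : PySem.Dict κ ν → α → ν → ν) :
    (l.foldl (fun d x => d.modify (key x) d0 (f d x)) PySem.Dict.empty).keys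
      = pvFD [] (l.map key) := by
  rw [PySem.Dict.keys_foldl_modify_key l key d0 f PySem.Dict.empty]
  have : (PySem.Dict.empty : PySem.Dict κ ν).keys = [] := by rfl
  rw [this, PySem.Set.update_nil_left, set_ofList_eq_pvFD]

theorem model_items {κ α : Type} [BEq κ] [LawfulBEq κ] [DecidableEq κ]
    (l : List α) (key : α → κ) (w : α → Int) :
    (l.foldl (fun d x => d.modify (key x) 0 (fun v => v + w x)) PySem.Dict.empty).items
      = (pvFD [] (l.map key)).map
          (fun k => (k, ((l.filter (fun x => key x == k)).map w).sum)) := by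
  set d := l.foldl (fun d x => d.modify (key x) 0 (fun v => v + w x)) PySem.Dict.empty with hd
  have hkeys : d.keys = pvFD [] (l.map key) := keys_foldl_modify_empty l key 0 _
  have hnodup : d.keys.Nodup := by
    apply PySem.Dict.nodup_keys_foldl_modify_key
    simp [PySem.Dict.nodup_keys_empty]
  have hitems : d.items = d.keys.map (fun k => (k, d.getD k 0)) := by
    have := dict_items_eq (κ := κ) d.items 0 (by exact hnodup)
    exact this
  rw [hitems, hkeys]
  apply List.map_congr_left
  intro k _
  rw [hd, getD_foldl_modify_add, PySem.Dict.getD_empty]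
  simp

def pvKernel (s : List Int) : List (List Int) :=
  (pvFD [] s).map (fun h => ((PySem.List.enumerate s).filter (fun p => p.2 == h)).map (·.1))

theorem inner_snd (dd : PySem.Dict Int Int) (s : List Int) :
    ((PySem.List.enumerate s).foldl
      (fun (acc : PySem.Dict Int (List Int) × Int) p =>
        (acc.1.modify p.2 [] (· ++ [p.1]), acc.2 * dd.getD p.2 0))
      (PySem.Dict.empty, 1)).2 = (s.map (fun x => dd.getD x 0)).prod := by
  rw [foldl_pair (PySem.List.enumerate s)
    (fun (d : PySem.Dict Int (List Int)) p => d.modify p.2 [] (· ++ [p.1]))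
    (fun (b : Int) p => b * dd.getD p.2 0)]
  simp only []
  rw [foldl_mul]
  have : (PySem.List.enumerate s).map (fun p => dd.getD p.2 0)
      = s.map (fun x => dd.getD x 0) := by
    have h2 := PySem.List.map_snd_enumerate s 0
    calc (PySem.List.enumerate s).map (fun p => dd.getD p.2 0)
        = ((PySem.List.enumerate s).map (fun p => p.2)).map (fun x => dd.getD x 0) := by
          rw [List.map_map]; rfl
      _ = s.map (fun x => dd.getD x 0) := by rw [h2]
  rw [this, one_mul]

theorem inner_fst_values (dd : PySem.Dict Int Int) (s : List Int) :
    ((PySem.List.enumerate s).foldl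
      (fun (acc : PySem.Dict Int (List Int) × Int) p =>
        (acc.1.modify p.2 [] (· ++ [p.1]), acc.2 * dd.getD p.2 0))
      (PySem.Dict.empty, 1)).1.values = pvKernel s := by
  rw [foldl_pair (PySem.List.enumerate s)
    (fun (d : PySem.Dict Int (List Int)) p => d.modify p.2 [] (· ++ [p.1]))
    (fun (b : Int) p => b * dd.getD p.2 0)]
  simp only []
  set d := (PySem.List.enumerate s).foldl
      (fun (d : PySem.Dict Int (List Int)) p => d.modify p.2 [] (· ++ [p.1]))
      PySem.Dict.empty with hd
  have hkeys : d.keys = pvFD [] s := by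
    rw [hd, keys_foldl_modify_empty (PySem.List.enumerate s) (fun p => p.2) []
      (fun _ p L => L ++ [p.1]), PySem.List.map_snd_enumerate]
  have hnodup : d.keys.Nodup := by
    apply PySem.Dict.nodup_keys_foldl_modify_key
    simp [PySem.Dict.nodup_keys_empty]
  have hitems : d.items = d.keys.map (fun k => (k, d.getD k [])) :=
    dict_items_eq d.items [] hnodup
  have hvalues : d.values = d.keys.map (fun k => d.getD k []) := by
    show d.items.map (fun x => x.2) = _
    rw [hitems, List.map_map, hkeys]
    rfl
  rw [hvalues, hkeys, pvKernel]
  apply List.map_congr_left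
  intro h _
  rw [hd, getD_foldl_modify_app (PySem.List.enumerate s) (fun p => p.2) (fun p => p.1),
    PySem.Dict.getD_empty]
  simp
def rgsOfAux : List Int → List Int → List Nat
  | _, [] => []
  | u, x :: s =>
    match List.idxOf? x u with
    | some j => j :: rgsOfAux u s
    | none => u.length :: rgsOfAux (u ++ [x]) s

theorem idxOf?_of_mem {u : List Int} {x : Int} (h : x ∈ u) :
    List.idxOf? x u = some (u.idxOf x) := by
  induction u with
  | nil => simp at h
  | cons y u ih =>
    by_cases hxy : y == x
    · simp [List.idxOf?_cons, List.idxOf_cons, hxy]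
    · have hx : x ∈ u := by
        rcases List.mem_cons.1 h with h1 | h1
        · exact absurd (by simp [h1]) hxy
        · exact h1
      simp [List.idxOf?_cons, List.idxOf_cons, hxy, ih hx]

theorem idxOf?_of_not_mem {u : List Int} {x : Int} (hx : x ∉ u) :
    List.idxOf? x u = none :=
  List.idxOf?_eq_none_iff.2 hx

theorem pvFD_nodup {α : Type} [BEq α] [LawfulBEq α] (l : List α) :
    ∀ s : List α, (pvFD s l).Nodup ∧ (∀ a ∈ pvFD s l, a ∉ s) := by
  induction l with
  | nil => intro s; simp [pvFD]
  | cons x l ih =>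
    intro s
    simp only [pvFD]
    by_cases hx : x ∈ s
    · rw [if_pos hx]; exact ih s
    · rw [if_neg hx]
      obtain ⟨hnd, hdisj⟩ := ih (s ++ [x])
      constructor
      · refine List.nodup_cons.2 ⟨fun hc => ?_, hnd⟩
        exact hdisj x hc (by simp)
      · intro a ha has
        rcases List.mem_cons.1 ha with h | h
        · exact hx (h ▸ has)
        · exact hdisj a h (by simp [has])

theorem rgsOfAux_eq_map (s : List Int) :
    ∀ u, rgsOfAux u s = s.map (fun x => (u ++ pvFD u s).idxOf x) := by
  induction s with
  | nil => intro u; rfl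
  | cons x s ih =>
    intro u
    by_cases hx : x ∈ u
    · simp only [rgsOfAux, idxOf?_of_mem hx, pvFD, if_pos hx, List.map_cons, List.cons_eq_cons]
      refine ⟨?_, ?_⟩
      · rw [List.idxOf_append_of_mem hx]
      · rw [ih u]
    · simp only [rgsOfAux, idxOf?_of_not_mem hx, pvFD, if_neg hx, List.map_cons, List.cons_eq_cons]
      refine ⟨?_, ?_⟩
      · rw [List.idxOf_append, if_neg hx]
        simp [List.idxOf_cons]
      · rw [ih (u ++ [x])]
        apply List.map_congr_left
        intro y _
        have h2 : u ++ x :: pvFD (u ++ [x]) s = (u ++ [x]) ++ pvFD (u ++ [x]) s := by simp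
        rw [h2]

theorem foldl_max_le (r : List Nat) :
    ∀ (a b : Nat), a ≤ b → (∀ j ∈ r, j + 1 ≤ b) → r.foldl (fun a j => max a (j + 1)) a ≤ b := by
  induction r with
  | nil => intro a b h _; simpa using h
  | cons j r ih =>
    intro a b ha hr
    simp only [List.foldl_cons]
    exact ih _ b (by simp [ha, hr j (by simp)]) (fun i hi => hr i (by simp [hi]))

theorem le_foldl_max_init (r : List Nat) :
    ∀ a, a ≤ r.foldl (fun a j => max a (j + 1)) a := by
  induction r with
  | nil => intro a; simp
  | cons j r ih =>
    intro a
    simp only [List.foldl_cons]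
    exact le_trans (le_max_left _ _) (ih _)

theorem le_foldl_max_mem (r : List Nat) :
    ∀ a j, j ∈ r → j + 1 ≤ r.foldl (fun a j => max a (j + 1)) a := by
  induction r with
  | nil => intro a j h; simp at h
  | cons i r ih =>
    intro a j hj
    simp only [List.foldl_cons]
    rcases List.mem_cons.1 hj with h | h
    · exact le_trans (h ▸ le_max_right a (j + 1)) (le_foldl_max_init r _)
    · exact ih _ j h

theorem enumerate_map {α β : Type} (f : α → β) (s : List α) :
    ∀ s0 : Int, PySem.List.enumerate (s.map f) s0
      = (PySem.List.enumerate s s0).map (fun p => (p.1, f p.2)) := by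
  induction s with
  | nil => intro s0; rfl
  | cons x s ih =>
    intro s0
    simp only [List.map_cons, PySem.List.enumerate_cons, ih (s0 + 1)]

theorem mem_snd_of_mem_enumerate {α : Type} {s : List α} {p : Int × α} {s0 : Int}
    (h : p ∈ PySem.List.enumerate s s0) : p.2 ∈ s := by
  rcases (PySem.List.mem_enumerate_iff s s0 p).1 h with ⟨k, hk, rfl⟩
  exact List.getElem_mem hk


theorem mem_pvFD_nil {α : Type} [BEq α] [LawfulBEq α] {l : List α} {a : α} :
    a ∈ pvFD [] l ↔ a ∈ l := by
  constructor
  · exact pvFD_sub l [] a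
  · intro h; exact pvFD_complete l [] a h (by simp)

theorem kval_eq (s : List Int) :
    ((s.map (fun x => (pvFD [] s).idxOf x)).foldl (fun a j => max a (j + 1)) 0)
      = (pvFD [] s).length := by
  apply le_antisymm
  · apply foldl_max_le
    · cases s with
      | nil => simp
      | cons x s =>
        have : x ∈ pvFD [] (x :: s) := mem_pvFD_nil.2 (by simp)
        have := List.length_pos_of_mem this
        omega
    · intro j hj
      rcases List.mem_map.1 hj with ⟨x, hx, rfl⟩
      have : x ∈ pvFD [] s := mem_pvFD_nil.2 hx
      exact List.idxOf_lt_length_of_mem this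
  · by_cases hs : pvFD [] s = []
    · simp [hs]
    · set F := pvFD [] s with hF
      have hlen : 0 < F.length := List.length_pos_of_ne_nil hs
      have hmem : F[F.length - 1] ∈ s := pvFD_sub s [] _ (List.getElem_mem _)
      have hidx : F.idxOf F[F.length - 1] = F.length - 1 :=
        (pvFD_nodup s []).1.idxOf_getElem _ _
      have : F.length - 1 + 1 ≤ (s.map (fun x => F.idxOf x)).foldl (fun a j => max a (j + 1)) 0 := by
        apply le_foldl_max_mem
        rw [← hidx]
        exact List.mem_map_of_mem hmem
      omega

theorem mem_poss {r : List Nat} {j : Nat} {a : Int} :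
    a ∈ ((PySem.List.enumerate r).filter (fun p => p.2 == j)).map (·.1)
      ↔ ∃ (i : Nat) (h : i < r.length), a = (i : Int) ∧ r[i] = j := by
  constructor
  · intro h
    rcases List.mem_map.1 h with ⟨p, hp, rfl⟩
    have hf := List.mem_filter.1 hp
    rcases (PySem.List.mem_enumerate_iff r 0 p).1 hf.1 with ⟨k, hk, rfl⟩
    refine ⟨k, hk, by simp, by simpa using hf.2⟩
  · rintro ⟨i, h, rfl, hr⟩
    refine List.mem_map.2 ⟨((i : Int), r[i]), List.mem_filter.2 ⟨?_, by simp [hr]⟩, rfl⟩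
    exact (PySem.List.mem_enumerate_iff r 0 _).2 ⟨i, h, by simp⟩

theorem pvKernel_eq_blocks (s : List Int) :
    pvKernel s = pvBlocks (rgsOfAux [] s) := by
  have hmap : rgsOfAux [] s = s.map (fun x => (pvFD [] s).idxOf x) := by
    rw [rgsOfAux_eq_map]; rfl
  rw [hmap, pvKernel, pvBlocks]
  set F := pvFD [] s with hF
  have hk : (s.map (fun x => F.idxOf x)).foldl (fun a j => max a (j + 1)) 0 = F.length :=
    kval_eq s
  rw [hk]
  apply List.ext_getElem (by simp)
  intro j h1 h2
  simp only [List.getElem_map, List.getElem_range]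
  have hj : j < F.length := by simpa using h1
  rw [enumerate_map]
  rw [List.filter_map, List.map_map]
  have hcong : List.filter ((fun p => p.2 == j) ∘ (fun (p : Int × Int) => (p.1, F.idxOf p.2)))
        (PySem.List.enumerate s 0)
      = List.filter (fun p => p.2 == F[j]) (PySem.List.enumerate s 0) := by
    apply List.filter_congr
    intro p hp
    have hps : p.2 ∈ s := mem_snd_of_mem_enumerate hp
    have hpF : p.2 ∈ F := mem_pvFD_nil.2 hps
    simp only [Function.comp]
    by_cases hq : p.2 = F[j]
    · have hidx : List.idxOf (F[j]) F = j := (pvFD_nodup s []).1.idxOf_getElem j hj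
      simp [hq, hidx]
    · have hlt : List.idxOf p.2 F < F.length := List.idxOf_lt_length_of_mem hpF
      have hget := List.getElem_idxOf hlt
      have hne : List.idxOf p.2 F ≠ j := by
        intro hc
        apply hq
        simp only [hc] at hget
        exact hget.symm
      simp [hq, hne]
  rw [hcong]
  simp [Function.comp]

theorem pvBlocks_inj {r1 r2 : List Nat} (hl : r1.length = r2.length)
    (h : pvBlocks r1 = pvBlocks r2) : r1 = r2 := by
  have hk : r1.foldl (fun a j => max a (j + 1)) 0 = r2.foldl (fun a j => max a (j + 1)) 0 := by
    have := congrArg List.length h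
    simpa [pvBlocks] using this
  apply List.ext_getElem hl
  intro i hi1 hi2
  have hj1 : r1[i] + 1 ≤ r1.foldl (fun a j => max a (j + 1)) 0 :=
    le_foldl_max_mem r1 0 _ (List.getElem_mem hi1)
  have hblock : ((PySem.List.enumerate r1).filter (fun p => p.2 == r1[i])).map (·.1)
      = ((PySem.List.enumerate r2).filter (fun p => p.2 == r1[i])).map (·.1) := by
    have h1 : r1[i] < r1.foldl (fun a j => max a (j + 1)) 0 := by omega
    have := congrArg (fun L => L[r1[i]]?) h
    simp only [pvBlocks] at this
    rw [List.getElem?_map, List.getElem?_map, List.getElem?_range h1, ← hk] at this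
    rw [List.getElem?_range h1] at this
    simpa using this
  have : ((i : Int)) ∈ ((PySem.List.enumerate r2).filter (fun p => p.2 == r1[i])).map (·.1) := by
    rw [← hblock]
    exact mem_poss.2 ⟨i, hi1, rfl, rfl⟩
  rcases mem_poss.1 this with ⟨i', hi', hii', hr2⟩
  have hieq : i' = i := by omega
  subst hieq
  exact hr2.symm

theorem mem_pvProd {K : List Int} : ∀ {m : Nat} {s : List Int},
    s ∈ pvProd K m ↔ s.length = m ∧ ∀ x ∈ s, x ∈ K := by
  intro m
  induction m with
  | zero =>
    intro s
    simp only [pvProd, List.mem_singleton, List.length_eq_zero_iff]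
    constructor
    · rintro rfl; simp
    · rintro ⟨rfl, _⟩; rfl
  | succ m ih =>
    intro s
    simp only [pvProd, List.mem_flatMap, List.mem_map]
    constructor
    · rintro ⟨k, hk, s', hs', rfl⟩
      obtain ⟨hlen, hmem⟩ := ih.1 hs'
      refine ⟨by simp [hlen], ?_⟩
      intro x hx
      rcases List.mem_cons.1 hx with h | h
      · exact h ▸ hk
      · exact hmem x h
    · rintro ⟨hlen, hmem⟩
      cases s with
      | nil => simp at hlen
      | cons x s' =>
        refine ⟨x, hmem x (by simp), s', ih.2 ⟨by simpa using hlen, fun y hy => hmem y (by simp [hy])⟩, rfl⟩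

theorem length_of_mem_pvRgs {D : Nat} : ∀ {m used : Nat} {r : List Nat},
    r ∈ pvRgs D m used → r.length = m := by
  intro m
  induction m with
  | zero => intro used r h; simp [pvRgs] at h; simp [h]
  | succ m ih =>
    intro used r h
    simp only [pvRgs, List.mem_flatMap, List.mem_map] at h
    rcases h with ⟨j, _, r', hr', rfl⟩
    simp [ih hr']

theorem mem_pvRgs_succ {D m used : Nat} {r : List Nat} :
    r ∈ pvRgs D (m + 1) used
      ↔ ∃ j r', r = j :: r' ∧ j < min (used + 1) D ∧ r' ∈ pvRgs D m (max used (j + 1)) := by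
  simp only [pvRgs, List.mem_flatMap, List.mem_map, List.mem_range]
  constructor
  · rintro ⟨j, hj, r', hr', rfl⟩
    exact ⟨j, r', rfl, hj, hr'⟩
  · rintro ⟨j, r', rfl, hj, hr'⟩
    exact ⟨j, hj, r', hr', rfl⟩

theorem nodup_subset_length {u K : List Int} (hu : u.Nodup) (hsub : ∀ x ∈ u, x ∈ K) :
    u.length ≤ K.length := by
  calc u.length = u.toFinset.card := (List.toFinset_card_of_nodup hu).symm
    _ ≤ K.toFinset.card := Finset.card_le_card (fun x hx => by
        simp only [List.mem_toFinset] at hx ⊢; exact hsub x hx)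
    _ ≤ K.length := K.toFinset_card_le

theorem exists_not_mem_of_lt {u K : List Int} (hK : K.Nodup) (hsub : ∀ x ∈ u, x ∈ K)
    (hlt : u.length < K.length) : ∃ x ∈ K, x ∉ u := by
  by_contra hc
  push_neg at hc
  have : K.length ≤ u.length := nodup_subset_length hK hc
  omega

theorem rgs_sound (K : List Int) : ∀ (s u : List Int),
    (∀ x ∈ s, x ∈ K) → u.Nodup → (∀ x ∈ u, x ∈ K) →
      rgsOfAux u s ∈ pvRgs K.length s.length u.length := by
  intro s
  induction s with
  | nil => intro u _ _ _; simp [rgsOfAux, pvRgs]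
  | cons x s ih =>
    intro u hs hu husub
    have hxK : x ∈ K := hs x (by simp)
    by_cases hx : x ∈ u
    · have : rgsOfAux u (x :: s) = u.idxOf x :: rgsOfAux u s := by
        simp [rgsOfAux, idxOf?_of_mem hx]
      rw [this, show (x :: s).length = s.length + 1 from rfl]
      apply mem_pvRgs_succ.2
      refine ⟨u.idxOf x, rgsOfAux u s, rfl, ?_, ?_⟩
      · have h1 : u.idxOf x < u.length := List.idxOf_lt_length_of_mem hx
        have h2 : u.length ≤ K.length := nodup_subset_length hu husub
        omega
      · have hmax : max u.length (u.idxOf x + 1) = u.length := by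
          have := List.idxOf_lt_length_of_mem hx
          omega
        rw [hmax]
        exact ih u (fun y hy => hs y (by simp [hy])) hu husub
    · have : rgsOfAux u (x :: s) = u.length :: rgsOfAux (u ++ [x]) s := by
        simp [rgsOfAux, idxOf?_of_not_mem hx]
      rw [this, show (x :: s).length = s.length + 1 from rfl]
      apply mem_pvRgs_succ.2
      refine ⟨u.length, rgsOfAux (u ++ [x]) s, rfl, ?_, ?_⟩
      · have : (u ++ [x]).length ≤ K.length := by
          apply nodup_subset_length
          · simp only [List.nodup_append, List.nodup_singleton, true_and,
              List.disjoint_singleton]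
            exact ⟨hu, fun a ha b hb => by simp at hb; exact fun he => hx ((he.trans hb) ▸ ha)⟩
          · intro y hy
            rcases List.mem_append.1 hy with h | h
            · exact husub y h
            · simp at h; exact h ▸ hxK
        simp at this
        omega
      · have hmax : max u.length (u.length + 1) = u.length + 1 := by omega
        rw [hmax]
        have := ih (u ++ [x]) (fun y hy => hs y (by simp [hy]))
          (by
            simp only [List.nodup_append, List.nodup_singleton, true_and, List.disjoint_singleton]
            exact ⟨hu, fun a ha b hb => by simp at hb; exact fun he => hx ((he.trans hb) ▸ ha)⟩)
          (fun y hy => by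
            rcases List.mem_append.1 hy with h | h
            · exact husub y h
            · simp at h; exact h ▸ hxK)
        simpa using this

theorem rgs_complete (K : List Int) (hK : K.Nodup) : ∀ (m : Nat) (u : List Int) (r : List Nat),
    u.Nodup → (∀ x ∈ u, x ∈ K) → r ∈ pvRgs K.length m u.length →
      ∃ s, s ∈ pvProd K m ∧ rgsOfAux u s = r := by
  intro m
  induction m with
  | zero =>
    intro u r _ _ hr
    simp only [pvRgs, List.mem_singleton] at hr
    exact ⟨[], by simp [pvProd], by simp [hr, rgsOfAux]⟩
  | succ m ih =>
    intro u r hu husub hr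
    rcases mem_pvRgs_succ.1 hr with ⟨j, r', rfl, hj, hr'⟩
    by_cases hjl : j < u.length
    · have hx : u[j] ∈ u := List.getElem_mem hjl
      have hidx : List.idxOf? u[j] u = some j := by
        rw [idxOf?_of_mem hx, hu.idxOf_getElem j hjl]
      have hmax : max u.length (j + 1) = u.length := by omega
      rw [hmax] at hr'
      rcases ih u r' hu husub hr' with ⟨s, hs, hrs⟩
      refine ⟨u[j] :: s, ?_, ?_⟩
      · rw [mem_pvProd] at hs ⊢
        refine ⟨by simp [hs.1], ?_⟩
        intro y hy
        rcases List.mem_cons.1 hy with h | h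
        · exact h ▸ husub _ hx
        · exact hs.2 y h
      · simp [rgsOfAux, hidx, hrs]
    · have hje : j = u.length := by omega
      have hlt : u.length < K.length := by omega
      rcases exists_not_mem_of_lt hK husub hlt with ⟨x, hxK, hxu⟩
      have hnodup : (u ++ [x]).Nodup := by
        simp only [List.nodup_append, List.nodup_singleton, true_and, List.disjoint_singleton]
        exact ⟨hu, fun a ha b hb => by simp at hb; exact fun he => hxu ((he.trans hb) ▸ ha)⟩
      have hsub : ∀ y ∈ u ++ [x], y ∈ K := by
        intro y hy
        rcases List.mem_append.1 hy with h | h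
        · exact husub y h
        · simp at h; exact h ▸ hxK
      have hr'' : r' ∈ pvRgs K.length m (u ++ [x]).length := by
        have hmax : max u.length (j + 1) = u.length + 1 := by omega
        rw [hmax] at hr'
        simpa using hr'
      rcases ih (u ++ [x]) r' hnodup hsub hr'' with ⟨s, hs, hrs⟩
      refine ⟨x :: s, ?_, ?_⟩
      · rw [mem_pvProd] at hs ⊢
        refine ⟨by simp [hs.1], ?_⟩
        intro y hy
        rcases List.mem_cons.1 hy with h | h
        · exact h ▸ hxK
        · exact hs.2 y h
      · simp [rgsOfAux, idxOf?_of_not_mem hxu, hrs, hje]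

theorem flatMap_congr_mem {α β : Type} {l : List α} {f g : α → List β}
    (h : ∀ a ∈ l, f a = g a) : l.flatMap f = l.flatMap g := by
  simp only [List.flatMap_def]
  rw [List.map_congr_left h]

theorem rgsOfAux_cons_of_mem {u : List Int} {x : Int} (hu : u.Nodup) {i : Nat}
    (hi : i < u.length) (hx : u[i] = x) (s : List Int) :
    rgsOfAux u (x :: s) = i :: rgsOfAux u s := by
  have hmem : x ∈ u := hx ▸ List.getElem_mem hi
  have : List.idxOf? x u = some i := by
    rw [idxOf?_of_mem hmem, ← hx, hu.idxOf_getElem i hi]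
  simp [rgsOfAux, this]

theorem rgsOfAux_cons_of_not_mem {u : List Int} {x : Int} (hx : x ∉ u) (s : List Int) :
    rgsOfAux u (x :: s) = u.length :: rgsOfAux (u ++ [x]) s := by
  simp [rgsOfAux, idxOf?_of_not_mem hx]

theorem M1_phase1 (K : List Int) (hK : K.Nodup) (m c : Nat) (hc : c ≤ K.length)
    (IH : pvFD [] ((pvProd K m).map (rgsOfAux (K.take c))) = pvRgs K.length m c) :
    ∀ (n i : Nat), i + n = c → ∀ (seen : List (List Nat)),
      (∀ (j : Nat) (t : List Nat), (j :: t) ∈ seen → j < i) →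
      pvFD seen (((K.take c).drop i).flatMap
          (fun x => (pvProd K m).map (fun s => rgsOfAux (K.take c) (x :: s))))
        = (List.range' i n).flatMap (fun j => (pvRgs K.length m c).map (j :: ·)) := by
  intro n
  induction n with
  | zero =>
    intro i hi seen _
    have hlen : ((K.take c).drop i).length = 0 := by
      simp [List.length_drop, List.length_take]
      omega
    rw [List.length_eq_zero_iff] at hlen
    simp [hlen, pvFD]
  | succ n ihn =>
    intro i hi seen hseen
    have hic : i < c := by omega
    have hicK : i < K.length := by omega
    have hitake : i < (K.take c).length := by simp [List.length_take]; omega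
    rw [List.drop_eq_getElem_cons hitake, List.flatMap_cons, pvFD_append]
    have hnodup_u : (K.take c).Nodup := (List.take_sublist c K).nodup hK
    have hgetu : (K.take c)[i] = K[i] := List.getElem_take
    have hseg : (pvProd K m).map (fun s => rgsOfAux (K.take c) ((K.take c)[i] :: s))
        = ((pvProd K m).map (rgsOfAux (K.take c))).map ((i : Nat) :: ·) := by
      rw [List.map_map]
      apply List.map_congr_left
      intro s _
      simp only [Function.comp]
      rw [rgsOfAux_cons_of_mem hnodup_u hitake rfl]
    rw [hseg]
    have hfd1 : pvFD seen ((((pvProd K m).map (rgsOfAux (K.take c)))).map ((i : Nat) :: ·))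
        = (pvRgs K.length m c).map ((i : Nat) :: ·) := by
      rw [pvFD_map_hd i _ seen [] (by
        intro t
        simp only [List.not_mem_nil, iff_false]
        intro hc2
        exact absurd (hseen i t hc2) (by omega)), IH]
    rw [hfd1]
    have hrest := ihn (i + 1) (by omega)
      (seen ++ ((pvProd K m).map (rgsOfAux (K.take c))).map ((i : Nat) :: ·))
      (by
        intro j t hj
        rcases List.mem_append.1 hj with h | h
        · exact lt_trans (hseen j t h) (by omega)
        · rcases List.mem_map.1 h with ⟨r, _, hr⟩
          have : j = i := by
            have := hr
            simp only [List.cons.injEq] at this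
            exact this.1.symm
          omega)
    rw [hrest, List.range'_succ]
    simp

theorem M1 (K : List Int) (hK : K.Nodup) : ∀ (m c : Nat), c ≤ K.length →
    pvFD [] ((pvProd K m).map (rgsOfAux (K.take c))) = pvRgs K.length m c := by
  intro m
  induction m with
  | zero =>
    intro c _
    simp [pvProd, pvRgs, rgsOfAux, pvFD]
  | succ m ih =>
    intro c hc
    have hulen : (K.take c).length = c := by simp [List.length_take]; omega
    have hnodup_u : (K.take c).Nodup := (List.take_sublist c K).nodup hK
    have hflat : (pvProd K (m + 1)).map (rgsOfAux (K.take c))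
        = K.flatMap (fun x => (pvProd K m).map (fun s => rgsOfAux (K.take c) (x :: s))) := by
      show (K.flatMap (fun k => (pvProd K m).map (k :: ·))).map (rgsOfAux (K.take c)) = _
      rw [List.map_flatMap]
      apply flatMap_congr_mem
      intro x _
      rw [List.map_map]
      rfl
    rw [hflat]
    have hsplit : K = K.take c ++ K.drop c := (List.take_append_drop c K).symm
    rw [show K.flatMap (fun x => (pvProd K m).map (fun s => rgsOfAux (K.take c) (x :: s)))
        = (K.take c).flatMap (fun x => (pvProd K m).map (fun s => rgsOfAux (K.take c) (x :: s)))
          ++ (K.drop c).flatMap (fun x => (pvProd K m).map (fun s => rgsOfAux (K.take c) (x :: s)))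
      from by rw [← List.flatMap_append, ← hsplit]]
    rw [pvFD_append]
    simp only [List.nil_append]
    set A := (K.take c).flatMap
        (fun x => (pvProd K m).map (fun s => rgsOfAux (K.take c) (x :: s))) with hA
    have hdrop0 : (K.take c).drop 0 = K.take c := rfl
    have hpart1 : pvFD [] A
        = (List.range' 0 c).flatMap (fun j => (pvRgs K.length m c).map (j :: ·)) := by
      have := M1_phase1 K hK m c hc (ih c hc) c 0 (by omega) [] (by simp)
      rw [hdrop0] at this
      exact this
    rw [hpart1]
    have hheadsA : ∀ (t : List Nat), (c :: t) ∉ A := by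
      intro t hmem
      rcases List.mem_flatMap.1 hmem with ⟨x, hx, ha2⟩
      rcases List.mem_map.1 ha2 with ⟨s, _, heq⟩
      have hxu : x ∈ K.take c := hx
      have hrw : rgsOfAux (K.take c) (x :: s)
          = (K.take c).idxOf x :: rgsOfAux (K.take c) s := by
        simp [rgsOfAux, idxOf?_of_mem hxu]
      rw [hrw] at heq
      have hlt : (K.take c).idxOf x < c := by
        have := List.idxOf_lt_length_of_mem hxu
        omega
      have : (K.take c).idxOf x = c := by
        simpa using congrArg (fun (L : List Nat) => L.headI) heq
      omega
    by_cases hcD : c < K.length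
    · rw [List.drop_eq_getElem_cons hcD, List.flatMap_cons, pvFD_append]
      have hKc_mem_drop : K[c] ∈ K.drop c := by
        rw [List.drop_eq_getElem_cons hcD]
        exact List.mem_cons_self
      have hKc_not_mem : K[c] ∉ K.take c := by
        intro hmem
        exact (List.disjoint_take_drop hK (le_refl c)) hmem hKc_mem_drop
      have htake1 : K.take c ++ [K[c]] = K.take (c + 1) := by
        rw [List.take_succ]
        simp [List.getElem?_eq_getElem hcD]
      have hseg : (pvProd K m).map (fun s => rgsOfAux (K.take c) (K[c] :: s))
          = ((pvProd K m).map (rgsOfAux (K.take (c + 1)))).map (c :: ·) := by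
        rw [List.map_map]
        apply List.map_congr_left
        intro s _
        simp only [Function.comp]
        rw [rgsOfAux_cons_of_not_mem hKc_not_mem, hulen, htake1]
      rw [hseg]
      have hfd2 : pvFD A (((pvProd K m).map (rgsOfAux (K.take (c + 1)))).map (c :: ·))
          = (pvRgs K.length m (c + 1)).map (c :: ·) := by
        rw [pvFD_map_hd c _ A [] (by
          intro t
          simp only [List.not_mem_nil, iff_false]
          exact hheadsA t), ih (c + 1) (by omega)]
      rw [hfd2]
      have hfd3 : pvFD
          (A ++ ((pvProd K m).map (rgsOfAux (K.take (c + 1)))).map (c :: ·))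
          ((K.drop (c + 1)).flatMap
            (fun x => (pvProd K m).map (fun s => rgsOfAux (K.take c) (x :: s)))) = [] := by
        apply pvFD_nil_of_subset
        intro a ha
        rcases List.mem_flatMap.1 ha with ⟨x, hx, ha2⟩
        rcases List.mem_map.1 ha2 with ⟨s, hs, rfl⟩
        have hxK : x ∈ K := (List.drop_sublist _ _).mem hx
        have hxu : x ∉ K.take c := by
          intro hmem
          exact (List.disjoint_take_drop hK (by omega : c ≤ c + 1)) hmem hx
        rw [rgsOfAux_cons_of_not_mem hxu, hulen]
        apply List.mem_append.2
        right
        apply List.mem_map.2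
        refine ⟨rgsOfAux (K.take c ++ [x]) s, ?_, rfl⟩
        have hbody : rgsOfAux (K.take c ++ [x]) s ∈ pvRgs K.length m (c + 1) := by
          have hnodup1 : (K.take c ++ [x]).Nodup := by
            simp only [List.nodup_append, List.nodup_singleton, true_and,
              List.disjoint_singleton]
            exact ⟨hnodup_u, fun a ha b hb => by
              simp at hb
              exact fun he => hxu ((he.trans hb) ▸ ha)⟩
          have hsub1 : ∀ y ∈ K.take c ++ [x], y ∈ K := by
            intro y hy
            rcases List.mem_append.1 hy with h | h
            · exact (List.take_sublist c K).mem h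
            · simp at h; exact h ▸ hxK
          have hsK := (mem_pvProd.1 hs)
          have := rgs_sound K s (K.take c ++ [x]) hsK.2 hnodup1 hsub1
          rw [hsK.1] at this
          simpa [hulen] using this
        rcases rgs_complete K hK m (K.take (c + 1)) _
          ((List.take_sublist (c + 1) K).nodup hK)
          (fun y hy => (List.take_sublist (c + 1) K).mem hy)
          (by
            have hlen1 : (K.take (c + 1)).length = c + 1 := by
              simp [List.length_take]; omega
            rw [hlen1]
            exact hbody) with ⟨s', hs', hrs'⟩
        exact List.mem_map.2 ⟨s', hs', hrs'⟩
      rw [hfd3, List.append_nil]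
      rw [show pvRgs K.length (m + 1) c
          = (List.range (min (c + 1) K.length)).flatMap
              (fun j => (pvRgs K.length m (max c (j + 1))).map (j :: ·)) from rfl]
      have hmin : min (c + 1) K.length = c + 1 := by omega
      rw [hmin, List.range_succ, List.flatMap_append]
      congr 1
      · rw [List.range_eq_range']
        apply flatMap_congr_mem
        intro j hj
        have : j < c := by
          have := List.mem_range'_1.1 hj
          omega
        rw [show max c (j + 1) = c from by omega]
      · simp [show max c (c + 1) = c + 1 from by omega]
    · have hceq : c = K.length := by omega
      have hdropnil : K.drop c = [] := by simp [hceq]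
      rw [hdropnil]
      simp only [List.flatMap_nil, pvFD, List.append_nil]
      rw [show pvRgs K.length (m + 1) c
          = (List.range (min (c + 1) K.length)).flatMap
              (fun j => (pvRgs K.length m (max c (j + 1))).map (j :: ·)) from rfl]
      have hmin : min (c + 1) K.length = c := by omega
      rw [hmin, List.range_eq_range']
      apply flatMap_congr_mem
      intro j hj
      have : j < c := by
        have := List.mem_range'_1.1 hj
        omega
      rw [show max c (j + 1) = c from by omega]

theorem sum_flatMap_int {α : Type} (K : List α) (f : α → List Int) :
    (K.flatMap f).sum = (K.map (fun x => (f x).sum)).sum := by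
  induction K with
  | nil => rfl
  | cons x K ih => simp [List.flatMap_cons, ih]

theorem sum_map_eq_single {α : Type} [DecidableEq α] (l : List α) (F : α → Int) (a : α) :
    l.Nodup → a ∈ l → (∀ b ∈ l, b ≠ a → F b = 0) → (l.map F).sum = F a := by
  induction l with
  | nil => intro _ h; simp at h
  | cons x l ih =>
    intro hnd hmem h0
    simp only [List.map_cons, List.sum_cons]
    rcases List.mem_cons.1 hmem with rfl | hmem'
    · have : ∀ b ∈ l, F b = 0 := by
        intro b hb
        apply h0 b (by simp [hb])
        intro hc
        exact (List.nodup_cons.1 hnd).1 (hc ▸ hb)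
      have hz : (l.map F).sum = 0 := by
        rw [List.map_congr_left this]
        simp
      simp [hz]
    · have hxa : x ≠ a := by
        intro hc
        exact (List.nodup_cons.1 hnd).1 (hc ▸ hmem')
      rw [h0 x (by simp) hxa, zero_add]
      exact ih (List.nodup_cons.1 hnd).2 hmem' (fun b hb hba => h0 b (by simp [hb]) hba)

theorem sum_map_if_filter {α : Type} (l : List α) (q : α → Bool) (g : α → Int) :
    (l.map (fun a => if q a then g a else 0)).sum = ((l.filter q).map g).sum := by
  induction l with
  | nil => rfl
  | cons x l ih =>
    simp only [List.map_cons, List.sum_cons, List.filter_cons]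
    by_cases hq : q x
    · simp [hq, ih]
    · simp [hq, ih]

theorem M2 (pos : List (Int × Int)) (hKnd : (pos.map (·.1)).Nodup)
    (wt : Int → Int) (hwt : ∀ p ∈ pos, wt p.1 = p.2) :
    ∀ (m : Nat) (asg : List (Int × Int)) (r : List Nat),
      (∀ a ∈ asg, a ∈ pos) → (asg.map (·.1)).Nodup →
      r ∈ pvRgs pos.length m asg.length →
      (((pvProd (pos.map (·.1)) m).filter
          (fun s => rgsOfAux (asg.map (·.1)) s == r)).map (fun s => (s.map wt).prod)).sum
        = pvWeight pos r asg := by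
  intro m
  induction m with
  | zero =>
    intro asg r _ _ hr
    simp only [pvRgs, List.mem_singleton] at hr
    subst hr
    simp [pvProd, rgsOfAux, pvWeight]
  | succ m ih =>
    intro asg r hasg hnd hr
    rcases mem_pvRgs_succ.1 hr with ⟨j, r', rfl, hj, hr'⟩
    have hulen : (asg.map (·.1)).length = asg.length := by simp
    -- rewrite the left-hand side as a sum over the first chosen homolog
    rw [show pvProd (pos.map (·.1)) (m + 1)
        = (pos.map (·.1)).flatMap (fun x => (pvProd (pos.map (·.1)) m).map (x :: ·)) from rfl]
    rw [List.filter_flatMap, List.map_flatMap, sum_flatMap_int]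
    -- the inner sum for a fixed first homolog x
    have hGx : ∀ x : Int,
        ((((pvProd (pos.map (·.1)) m).map (x :: ·)).filter
            (fun s => rgsOfAux (asg.map (·.1)) s == j :: r')).map
          (fun s => (s.map wt).prod)).sum
        = if x ∈ asg.map (·.1) then
            (if (asg.map (·.1)).idxOf x = j then
              wt x * (((pvProd (pos.map (·.1)) m).filter
                (fun s => rgsOfAux (asg.map (·.1)) s == r')).map (fun s => (s.map wt).prod)).sum
            else 0)
          else
            (if j = asg.length then
              wt x * (((pvProd (pos.map (·.1)) m).filter
                (fun s => rgsOfAux (asg.map (·.1) ++ [x]) s == r')).map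
                  (fun s => (s.map wt).prod)).sum
            else 0) := by
      intro x
      rw [List.filter_map, List.map_map]
      by_cases hx : x ∈ asg.map (·.1)
      · rw [if_pos hx]
        have hcond : ∀ s, ((fun s => rgsOfAux (asg.map (·.1)) s == j :: r') ∘ (x :: ·)) s
            = (((asg.map (·.1)).idxOf x == j) && (rgsOfAux (asg.map (·.1)) s == r')) := by
          intro s
          simp only [Function.comp]
          rw [show rgsOfAux (asg.map (·.1)) (x :: s)
              = (asg.map (·.1)).idxOf x :: rgsOfAux (asg.map (·.1)) s from by
            simp [rgsOfAux, idxOf?_of_mem hx]]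
          exact List.cons_beq_cons
        by_cases hij : (asg.map (·.1)).idxOf x = j
        · rw [if_pos hij]
          have hfe : List.filter ((fun s => rgsOfAux (asg.map (·.1)) s == j :: r') ∘ (x :: ·))
              (pvProd (pos.map (·.1)) m)
            = List.filter (fun s => rgsOfAux (asg.map (·.1)) s == r')
              (pvProd (pos.map (·.1)) m) := by
            apply List.filter_congr
            intro s _
            rw [hcond s, hij]
            simp
          rw [hfe, ← List.sum_map_mul_left]
          apply congrArg
          apply List.map_congr_left
          intro s _
          simp [Function.comp, mul_comm]
        · rw [if_neg hij]
          have hfe : List.filter ((fun s => rgsOfAux (asg.map (·.1)) s == j :: r') ∘ (x :: ·))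
              (pvProd (pos.map (·.1)) m) = [] := by
            apply List.filter_eq_nil_iff.mpr
            intro s _
            rw [hcond s]
            simp [hij]
          rw [hfe]
          simp
      · rw [if_neg hx]
        have hcond : ∀ s, ((fun s => rgsOfAux (asg.map (·.1)) s == j :: r') ∘ (x :: ·)) s
            = ((asg.length == j) && (rgsOfAux (asg.map (·.1) ++ [x]) s == r')) := by
          intro s
          simp only [Function.comp]
          rw [rgsOfAux_cons_of_not_mem hx, hulen]
          exact List.cons_beq_cons
        by_cases hju : j = asg.length
        · rw [if_pos hju]
          have hfe : List.filter ((fun s => rgsOfAux (asg.map (·.1)) s == j :: r') ∘ (x :: ·))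
              (pvProd (pos.map (·.1)) m)
            = List.filter (fun s => rgsOfAux (asg.map (·.1) ++ [x]) s == r')
              (pvProd (pos.map (·.1)) m) := by
            apply List.filter_congr
            intro s _
            rw [hcond s, hju]
            simp
          rw [hfe, ← List.sum_map_mul_left]
          apply congrArg
          apply List.map_congr_left
          intro s _
          simp [Function.comp, mul_comm]
        · rw [if_neg hju]
          have hfe : List.filter ((fun s => rgsOfAux (asg.map (·.1)) s == j :: r') ∘ (x :: ·))
              (pvProd (pos.map (·.1)) m) = [] := by
            apply List.filter_eq_nil_iff.mpr
            intro s _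
            rw [hcond s]
            simp only [Bool.and_eq_true, beq_iff_eq, not_and, decide_eq_true_eq]
            exact fun hc => absurd hc.symm hju
          rw [hfe]
          simp
    rw [List.map_congr_left (fun x _ => hGx x)]
    by_cases hjc : j < asg.length
    · -- an existing block: only the homolog already assigned to block j contributes
      have hjulen : j < (asg.map (·.1)).length := by omega
      have hgetu : (asg.map (·.1))[j] = asg[j].1 := by simp
      have hajpos : asg[j] ∈ pos := hasg _ (List.getElem_mem (by omega))
      have haK : (asg.map (·.1))[j] ∈ pos.map (·.1) := by
        rw [hgetu]; exact List.mem_map_of_mem hajpos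
      rw [sum_map_eq_single (pos.map (·.1)) _ ((asg.map (·.1))[j]) hKnd haK (by
        intro b hb hbne
        by_cases hbu : b ∈ asg.map (·.1)
        · rw [if_pos hbu]
          have hne : (asg.map (·.1)).idxOf b ≠ j := by
            intro hc2
            apply hbne
            have hlt : (asg.map (·.1)).idxOf b < (asg.map (·.1)).length :=
              List.idxOf_lt_length_of_mem hbu
            have hget := List.getElem_idxOf hlt
            simp only [hc2] at hget
            exact hget.symm
          rw [if_neg hne]
        · rw [if_neg hbu, if_neg (by omega : ¬ j = asg.length)])]
      rw [if_pos (List.getElem_mem hjulen), if_pos (hnd.idxOf_getElem j hjulen)]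
      have hmax : max asg.length (j + 1) = asg.length := by omega
      rw [hmax] at hr'
      rw [ih asg r' hasg hnd hr']
      rw [hgetu, hwt _ hajpos]
      simp only [pvWeight]
      rw [dif_pos hjc]
    · -- a new block: sum over the homologs not yet assigned
      have hje : j = asg.length := by omega
      rw [List.map_map]
      have hPer : ∀ p ∈ pos,
          ((fun x => if x ∈ asg.map (·.1) then
              (if (asg.map (·.1)).idxOf x = j then
                wt x * (((pvProd (pos.map (·.1)) m).filter
                  (fun s => rgsOfAux (asg.map (·.1)) s == r')).map
                    (fun s => (s.map wt).prod)).sum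
              else 0)
            else
              (if j = asg.length then
                wt x * (((pvProd (pos.map (·.1)) m).filter
                  (fun s => rgsOfAux (asg.map (·.1) ++ [x]) s == r')).map
                    (fun s => (s.map wt).prod)).sum
              else 0)) ∘ (·.1)) p
          = if (decide (p.1 ∉ asg.map (·.1))) then p.2 * pvWeight pos r' (asg ++ [p]) else 0 := by
        intro p hp
        simp only [Function.comp]
        by_cases hmem : p.1 ∈ asg.map (·.1)
        · rw [if_pos hmem]
          have hne : (asg.map (·.1)).idxOf p.1 ≠ j := by
            have h2 := List.idxOf_lt_length_of_mem hmem
            rw [hulen] at h2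
            omega
          rw [if_neg hne]
          simp [hmem]
        · rw [if_neg hmem, if_pos hje]
          have hnd' : ((asg ++ [p]).map (·.1)).Nodup := by
            rw [List.map_append]
            simp only [List.map_cons, List.map_nil]
            simp only [List.nodup_append, List.nodup_singleton, true_and,
              List.disjoint_singleton]
            refine ⟨hnd, fun a ha b hb => ?_⟩
            simp only [List.mem_singleton] at hb
            exact fun he => hmem (hb ▸ he ▸ ha)
          have hasg' : ∀ a ∈ asg ++ [p], a ∈ pos := by
            intro a ha
            rcases List.mem_append.1 ha with h | h
            · exact hasg a h
            · simp at h; exact h ▸ hp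
          have hr'' : r' ∈ pvRgs pos.length m (asg ++ [p]).length := by
            have hmax : max asg.length (j + 1) = asg.length + 1 := by omega
            rw [hmax] at hr'
            simpa using hr'
          have := ih (asg ++ [p]) r' hasg' hnd' hr''
          rw [List.map_append] at this
          simp only [List.map_cons, List.map_nil] at this
          rw [this, hwt p hp]
          simp [hmem]
      rw [List.map_congr_left hPer]
      rw [sum_map_if_filter pos (fun p => decide (p.1 ∉ asg.map (·.1)))
        (fun p => p.2 * pvWeight pos r' (asg ++ [p]))]
      simp only [pvWeight]
      rw [dif_neg hjc]
      rw [foldl_add_int (pos.filter (fun p => asg.all (fun a => decide (a.1 ≠ p.1))))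
        (fun p => p.2 * pvWeight pos r' (asg ++ [p])) 0, zero_add]
      congr 1
      apply congrArg
      apply List.filter_congr
      intro p hp
      by_cases hmem : p.1 ∈ asg.map (·.1)
      · have h1 : (asg.all fun a => decide (a.1 ≠ p.1)) = false := by
          rcases List.mem_map.1 hmem with ⟨a, ha, he⟩
          simp only [List.all_eq_false]
          exact ⟨a, ha, by simp [he]⟩
        rw [h1, decide_eq_false (not_not_intro hmem)]
      · have h1 : (asg.all fun a => decide (a.1 ≠ p.1)) = true := by
          simp only [List.all_eq_true]
          intro a ha
          simp only [decide_eq_true_eq]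
          exact fun he => hmem (he ▸ List.mem_map_of_mem (f := fun x => x.1) ha)
        rw [h1, decide_eq_true hmem]

theorem length_rgsOfAux (u s : List Int) : (rgsOfAux u s).length = s.length := by
  rw [rgsOfAux_eq_map]; simp

theorem pvPos_fst_nodup (degs : List Int) : ((pvPos degs).map (·.1)).Nodup := by
  have hpw : (pvPos degs).Pairwise (fun p q => p.1 < q.1) :=
    List.Pairwise.sublist List.filter_sublist (PySem.List.pairwise_lt_enumerate degs 0)
  have : ((pvPos degs).map (·.1)).Pairwise (· < ·) := List.pairwise_map.2 hpw
  exact this.imp (fun h => ne_of_lt h)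

theorem dd_items (degs : List Int) :
    (PySem.Dict.ofList (pvPos degs) : PySem.Dict Int Int).items = pvPos degs := by
  show (List.foldl (fun acc p => acc.insert p.1 p.2) PySem.Dict.empty (pvPos degs)).items = _
  have := PySem.Dict.items_foldl_insert_fresh (pvPos degs) (fun p => p.1) (fun p => p.2)
    PySem.Dict.empty (fun a _ => PySem.Dict.contains_empty _) (pvPos_fst_nodup degs)
  simpa using this

theorem dd_keys (degs : List Int) :
    (PySem.Dict.ofList (pvPos degs) : PySem.Dict Int Int).keys = (pvPos degs).map (·.1) := by
  show (PySem.Dict.ofList (pvPos degs) : PySem.Dict Int Int).items.map (·.1) = _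
  rw [dd_items]

theorem dd_getD (degs : List Int) :
    ∀ p ∈ pvPos degs, (PySem.Dict.ofList (pvPos degs) : PySem.Dict Int Int).getD p.1 0 = p.2 := by
  intro p hp
  apply PySem.Dict.getD_of_mem_items
  · rw [dd_items]; exact hp
  · rw [dd_keys]; exact pvPos_fst_nodup degs

theorem ENGINE_eq_alt (number_of_reads : Int) (degeneracies : List Int) :
    ENGINE number_of_reads degeneracies = ENGINE_alt number_of_reads degeneracies := by
  set pos := pvPos degeneracies with hpos
  set dd : PySem.Dict Int Int := PySem.Dict.ofList pos with hdd
  set m := number_of_reads.toNat with hm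
  set wt : Int → Int := fun x => dd.getD x 0 with hwt
  have hK : dd.keys = pos.map (·.1) := dd_keys degeneracies
  have hKnd : (pos.map (·.1)).Nodup := pvPos_fst_nodup degeneracies
  have hwtp : ∀ p ∈ pos, wt p.1 = p.2 := dd_getD degeneracies
  -- rewrite A's fold body
  have hbody : (fun (model : PySem.Dict (List (List Int)) Int) (sequence : List Int) =>
      let hw : PySem.Dict Int (List Int) × Int :=
        (PySem.List.enumerate sequence).foldl
          (fun (acc : PySem.Dict Int (List Int) × Int) p =>
            (acc.1.modify p.2 [] (· ++ [p.1]), acc.2 * dd.getD p.2 0))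
          (PySem.Dict.empty, 1)
      model.modify hw.1.values 0 (· + hw.2))
      = fun model s => model.modify (pvKernel s) 0 (fun v => v + (s.map wt).prod) := by
    funext model s
    show model.modify _ 0 _ = _
    rw [inner_fst_values dd s, inner_snd dd s]
  have hA : ENGINE number_of_reads degeneracies
      = (pvFD [] ((pvProd (pos.map (·.1)) m).map pvKernel)).map
          (fun P => (P, (((pvProd (pos.map (·.1)) m).filter
            (fun s => pvKernel s == P)).map (fun s => (s.map wt).prod)).sum)) := by
    show ((pvProd dd.keys m).foldl
      (fun (model : PySem.Dict (List (List Int)) Int) (sequence : List Int) =>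
        let hw : PySem.Dict Int (List Int) × Int :=
          (PySem.List.enumerate sequence).foldl
            (fun (acc : PySem.Dict Int (List Int) × Int) p =>
              (acc.1.modify p.2 [] (· ++ [p.1]), acc.2 * dd.getD p.2 0))
            (PySem.Dict.empty, 1)
        model.modify hw.1.values 0 (· + hw.2)) PySem.Dict.empty).items = _
    rw [hbody, hK]
    exact model_items (pvProd (pos.map (·.1)) m) pvKernel (fun s => (s.map wt).prod)
  rw [hA]
  -- replace kernels by blocks of rgs strings
  have hkb : (pvProd (pos.map (·.1)) m).map pvKernel
      = ((pvProd (pos.map (·.1)) m).map (rgsOfAux [])).map pvBlocks := by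
    rw [List.map_map]
    exact List.map_congr_left (fun s _ => pvKernel_eq_blocks s)
  have hlenL : ∀ r ∈ (pvProd (pos.map (·.1)) m).map (rgsOfAux []), r.length = m := by
    intro r hr
    rcases List.mem_map.1 hr with ⟨s, hs, rfl⟩
    rw [length_rgsOfAux]
    exact (mem_pvProd.1 hs).1
  have hfdmap : pvFD [] (((pvProd (pos.map (·.1)) m).map (rgsOfAux [])).map pvBlocks)
      = (pvFD [] ((pvProd (pos.map (·.1)) m).map (rgsOfAux []))).map pvBlocks := by
    have := pvFD_map_of_inj pvBlocks ((pvProd (pos.map (·.1)) m).map (rgsOfAux [])) []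
      (by
        intro a b ha hb hab
        have hb' : b ∈ (pvProd (pos.map (·.1)) m).map (rgsOfAux []) := by
          rcases hb with h | h
          · simp at h
          · exact h
        exact pvBlocks_inj ((hlenL a ha).trans (hlenL b hb').symm) hab)
    simpa using this
  have htake0 : (pos.map (·.1)).take 0 = [] := rfl
  have hM1 : pvFD [] ((pvProd (pos.map (·.1)) m).map (rgsOfAux []))
      = pvRgs (pos.map (·.1)).length m 0 := by
    have := M1 (pos.map (·.1)) hKnd m 0 (by omega)
    rw [htake0] at this
    exact this
  rw [hkb, hfdmap, hM1]
  have hlenK : (pos.map (·.1)).length = pos.length := by simp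
  rw [hlenK]
  -- pointwise over the rgs list
  show _ = ENGINE_alt number_of_reads degeneracies
  rw [show ENGINE_alt number_of_reads degeneracies
      = (pvRgs pos.length m 0).map (fun r => (pvBlocks r, pvWeight pos r [])) from rfl]
  rw [List.map_map]
  apply List.map_congr_left
  intro r hr
  simp only [Function.comp]
  have hrlen : r.length = m := length_of_mem_pvRgs hr
  have hfilterc : ∀ s ∈ pvProd (pos.map (·.1)) m,
      (pvKernel s == pvBlocks r) = (rgsOfAux [] s == r) := by
    intro s hs
    rw [pvKernel_eq_blocks s]
    by_cases he : rgsOfAux [] s = r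
    · rw [he]; simp
    · have hne : pvBlocks (rgsOfAux [] s) ≠ pvBlocks r := by
        intro hc
        apply he
        apply pvBlocks_inj _ hc
        rw [length_rgsOfAux, (mem_pvProd.1 hs).1, hrlen]
      simp [hne, he]
  rw [List.filter_congr hfilterc]
  have hM2 := M2 pos hKnd wt hwtp m [] r (by simp) (by simp) (by simpa using hr)
  simp only [List.map_nil] at hM2
  rw [hM2]

-- ===== VERDICT (by name: the statement is the Claim_ definition above) =====
theorem ENGINE_spec : Claim_equal_ENGINE := by
  intro number_of_reads degeneracies _ _
  show ENGINE number_of_reads degeneracies = ENGINE_alt number_of_reads degeneracies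
  exact ENGINE_eq_alt number_of_reads degeneracies
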